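-- pv_equiv track=rewrite | github.com/lmriccardo/docker-security | redex/redex.py | merge_args
-- ===== SOURCE A (Python) =====
-- from typing import Dict, Any, Optional, List
--
-- def merge_args(args: List[str]) -> List[str]:
--     outputs = []
--     old = ""
--
--     for el in args:
--         if "=" in el:
--             if old != "":
--                 outputs.append(old.strip())
--
--             old = el
--             continue
--
--         old += " " + el
--
--     outputs.append(old.strip())
--     return outputs
-- ===== SOURCE B (Python) =====
-- def merge_args(args):
--     # Scan the tokens BACK TO FRONT: each group is collected from its trailing
--     # tokens up to (and including) the '='-token that starts it; the group left
--     # open at the end is the leading non-'=' prefix, kept only if non-empty or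
--     # if it is the only group.  Groups and their tokens are accumulated in
--     # reverse and un-reversed once at the end.
--     rev_groups = [[]]
--     for el in reversed(args):
--         rev_groups[-1].append(el)
--         if "=" in el:
--             rev_groups.append([])
--     lead = rev_groups.pop()
--     if lead or not rev_groups:
--         rev_groups.append(lead)
--     return [" ".join(reversed(g)).strip() for g in reversed(rev_groups)]
-- ===== Notes on version B (the rewrite author's own statement) =====
-- stated objective: alternative
-- what changed: B traverses the tokens in reverse, collecting each group back-to-front from its trailing tokens up to the '='-token that starts it (the group left open at the end is the leading prefix, kept only if non-empty or alone), instead of A's forward pass that grows a string accumulator and flushes it at each '='-token.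
import Mathlib
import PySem

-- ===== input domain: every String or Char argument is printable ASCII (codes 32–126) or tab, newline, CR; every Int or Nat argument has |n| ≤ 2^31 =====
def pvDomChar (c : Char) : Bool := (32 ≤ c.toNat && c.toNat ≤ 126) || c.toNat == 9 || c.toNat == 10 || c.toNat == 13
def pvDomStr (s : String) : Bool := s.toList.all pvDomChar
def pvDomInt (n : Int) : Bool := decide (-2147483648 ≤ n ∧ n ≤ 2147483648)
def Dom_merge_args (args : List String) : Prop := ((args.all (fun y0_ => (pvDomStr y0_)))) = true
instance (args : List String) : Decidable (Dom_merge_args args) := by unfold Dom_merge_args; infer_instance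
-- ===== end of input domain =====

-- B scans the tokens in reverse, collecting each group back-to-front up to the
-- '='-token that starts it, instead of A's forward string accumulator flushed
-- at markers (objective: alternative decomposition; return value only).

-- ===== PORT A =====
-- A's loop state: (outputs, old); old is kept as List Char ("" + concatenation).
def mergeStepA (s : List String × List Char) (el : String) : List String × List Char :=
  if PySem.Str.isIn "=" el then
    ((if s.2 ≠ [] then s.1 ++ [String.ofList (PySem.Chars.strip s.2)] else s.1), el.toList)
  else (s.1, s.2 ++ ' ' :: el.toList)      -- old += " " + el

def merge_args (args : List String) : List String :=
  let st := args.foldl mergeStepA ([], [])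
  st.1 ++ [String.ofList (PySem.Chars.strip st.2)]

-- ===== PORT B =====
-- " ".join(reversed(g)).strip(); groups are stored token-reversed (Python's
-- end-appends are head-conses here), so the reversal cancels and g is joined as is.
def mergeGroup (g : List String) : String :=
  String.ofList (PySem.Chars.strip (PySem.Chars.join [' '] (g.map String.toList)))

-- one step of the reverse scan; the state is rev_groups with Python's LAST
-- element at the head (end-appends become head-conses); [] is unreachable.
def stepRev (st : List (List String)) (el : String) : List (List String) :=
  match st with
  | [] => []
  | g :: gs =>
    let g' := el :: g                       -- rev_groups[-1].append(el)
    if PySem.Str.isIn "=" el then [] :: g' :: gs else g' :: gs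

def merge_args_alt (args : List String) : List String :=
  let st := args.reverse.foldl stepRev [[]]     -- for el in reversed(args)
  match st with
  | [] => []                                    -- unreachable: st is never empty
  | lead :: rest =>                             -- lead = rev_groups.pop()
    let groups := if lead ≠ [] ∨ rest = [] then lead :: rest else rest
    groups.map mergeGroup

-- ===== PRECONDITION & SPEC =====
def Spec_merge_args (args : List String) (out : List String) : Prop := out = merge_args_alt args
instance (args : List String) (out : List String) : Decidable (Spec_merge_args args out) := by unfold Spec_merge_args; infer_instance

-- ===== CLAIM (what is proved, stated in full; the proofs are below) =====
def Claim_equal_merge_args : Prop := ∀ (args : List String), Dom_merge_args args → Spec_merge_args args (merge_args args)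

-- ===== LEMMAS AND PROOFS =====

-- proof-only: the grouping as structural recursion (tail grouped first)
def pvGroup : List String → List (List String)
  | [] => [[]]
  | head :: tail =>
    match pvGroup tail with
    | [] => []
    | g0 :: gs =>
      if PySem.Str.isIn "=" head then [] :: (head :: g0) :: gs
      else (head :: g0) :: gs

-- proof-only intermediate: the group-list fold (flush current group at markers)
def mergeStepB (s : List (List String) × List String) (el : String) : List (List String) × List String :=
  if PySem.Str.isIn "=" el then
    ((if s.2 ≠ [] then s.1 ++ [s.2] else s.1), [el])
  else (s.1, s.2 ++ [el])

-- " ".join of one more token, non-empty group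
lemma join_space_append (xs : List (List Char)) (y : List Char) (h : xs ≠ []) :
    PySem.Chars.join [' '] (xs ++ [y]) = PySem.Chars.join [' '] xs ++ ' ' :: y := by
  induction xs with
  | nil => simp at h
  | cons a t ih =>
    cases t with
    | nil => simp [PySem.Chars.join, List.intercalate]
    | cons b r =>
      have := ih (by simp)
      simp only [List.cons_append, PySem.Chars.join_cons_cons] at this ⊢
      simp [this]

-- strip ignores a leading space
lemma strip_cons_space (s : List Char) : PySem.Chars.strip (' ' :: s) = PySem.Chars.strip s := by
  simp [PySem.Chars.strip, PySem.Chars.lstrip, PySem.Chars.isspace]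

-- the " "-joined characters of a group
def jg (g : List String) : List Char := PySem.Chars.join [' '] (g.map String.toList)

-- invariant tying A's accumulator string to the current group of the fold
def MInv (oldA : List Char) (curB : List String) : Prop :=
  (oldA = [] ∧ curB = []) ∨
  (oldA ≠ [] ∧ curB ≠ [] ∧ (oldA = jg curB ∨ oldA = ' ' :: jg curB))

lemma strip_of_inv {oldA : List Char} {curB : List String} (h : MInv oldA curB) :
    PySem.Chars.strip oldA = PySem.Chars.strip (jg curB) := by
  rcases h with ⟨h1, h2⟩ | ⟨_, _, h | h⟩
  · subst h1 h2; rfl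
  · rw [h]
  · rw [h, strip_cons_space]

lemma nonempty_toList_of_isIn_eq (el : String) (h : PySem.Str.isIn "=" el = true) :
    el.toList ≠ [] := by
  rw [PySem.Str.isIn_iff_infix] at h
  intro hnil
  rw [hnil] at h
  simp at h

-- A's fold equals the group-list fold rendered with mergeGroup
lemma merge_loop (args : List String) : ∀ (outB : List (List String)) (oldA : List Char)
    (curB : List String), MInv oldA curB →
    (args.foldl mergeStepA (outB.map mergeGroup, oldA)).1
      ++ [String.ofList (PySem.Chars.strip (args.foldl mergeStepA (outB.map mergeGroup, oldA)).2)]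
    = ((args.foldl mergeStepB (outB, curB)).1
        ++ [(args.foldl mergeStepB (outB, curB)).2]).map mergeGroup := by
  induction args with
  | nil =>
    intro outB oldA curB hinv
    simp only [List.foldl_nil, List.map_append, List.map]
    have := strip_of_inv hinv
    simp [mergeGroup, jg] at this ⊢
    rw [this]
  | cons el rest ih =>
    intro outB oldA curB hinv
    simp only [List.foldl_cons]
    by_cases he : PySem.Str.isIn "=" el = true
    · have hflush : (if oldA ≠ [] then outB.map mergeGroup ++ [String.ofList (PySem.Chars.strip oldA)]
            else outB.map mergeGroup)
          = (if curB ≠ [] then outB ++ [curB] else outB).map mergeGroup := by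
        have hs := strip_of_inv hinv
        rcases hinv with ⟨h1, h2⟩ | ⟨h1, h2, _⟩
        · subst h1 h2; simp
        · simp [h1, h2, mergeGroup, hs, jg]
      have hinv' : MInv el.toList [el] := by
        refine Or.inr ⟨nonempty_toList_of_isIn_eq el he, by simp, Or.inl ?_⟩
        simp [jg, PySem.Chars.join, List.intercalate]
      have hstepA : mergeStepA (outB.map mergeGroup, oldA) el
          = ((if curB ≠ [] then outB ++ [curB] else outB).map mergeGroup, el.toList) := by
        simp only [mergeStepA, if_pos he]; rw [hflush]
      have hstepB : mergeStepB (outB, curB) el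
          = ((if curB ≠ [] then outB ++ [curB] else outB), [el]) := by
        simp only [mergeStepB, if_pos he]
      rw [hstepA, hstepB]
      exact ih _ _ _ hinv'
    · have hj : ∀ (c : List String), c ≠ [] → jg (c ++ [el]) = jg c ++ ' ' :: el.toList := by
        intro c hc
        unfold jg
        rw [show (c ++ [el]).map String.toList = c.map String.toList ++ [el.toList] from by simp]
        exact join_space_append _ _ (by simpa using hc)
      have hinv' : MInv (oldA ++ ' ' :: el.toList) (curB ++ [el]) := by
        rcases hinv with ⟨h1, h2⟩ | ⟨h1, h2, h3 | h3⟩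
        · subst h1 h2
          exact Or.inr ⟨by simp, by simp,
            Or.inr (by simp [jg, PySem.Chars.join, List.intercalate])⟩
        · exact Or.inr ⟨by simp [h1], by simp, Or.inl (by rw [hj curB h2, h3])⟩
        · exact Or.inr ⟨by simp [h1], by simp, Or.inr (by rw [hj curB h2, h3]; simp)⟩
      have hstepA : mergeStepA (outB.map mergeGroup, oldA) el
          = (outB.map mergeGroup, oldA ++ ' ' :: el.toList) := by
        simp only [mergeStepA, if_neg he]
      have hstepB : mergeStepB (outB, curB) el = (outB, curB ++ [el]) := by
        simp only [mergeStepB, if_neg he]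
      rw [hstepA, hstepB]
      exact ih _ _ _ hinv'

lemma pvGroup_ne_nil (args : List String) : pvGroup args ≠ [] := by
  cases args with
  | nil => simp [pvGroup]
  | cons h t =>
    simp only [pvGroup]
    cases hg : pvGroup t with
    | nil => exact absurd hg (pvGroup_ne_nil t)
    | cons g0 gs => split_ifs <;> simp

-- combine a pending current group with the recursive grouping of the rest
def mergeM (cur : List String) : List (List String) → List (List String)
  | [] => []
  | g0 :: gs => if cur ++ g0 = [] ∧ gs ≠ [] then gs else (cur ++ g0) :: gs

-- the group-list fold computes mergeM of the recursive grouping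
lemma foldB_eq_mergeM (args : List String) : ∀ (gs : List (List String)) (cur : List String),
    (args.foldl mergeStepB (gs, cur)).1 ++ [(args.foldl mergeStepB (gs, cur)).2]
    = gs ++ mergeM cur (pvGroup args) := by
  induction args with
  | nil => intro gs cur; simp [pvGroup, mergeM]
  | cons el rest ih =>
    intro gs cur
    obtain ⟨g0, gs', hg⟩ := List.exists_cons_of_ne_nil (pvGroup_ne_nil rest)
    simp only [List.foldl_cons]
    by_cases he : PySem.Str.isIn "=" el = true
    · have hstep : mergeStepB (gs, cur) el
          = ((if cur ≠ [] then gs ++ [cur] else gs), [el]) := by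
        simp only [mergeStepB, if_pos he]
      rw [hstep, ih]
      simp only [pvGroup, hg, if_pos he, mergeM]
      by_cases hc : cur = [] <;> simp [hc, mergeM]
    · have hstep : mergeStepB (gs, cur) el = (gs, cur ++ [el]) := by
        simp only [mergeStepB, if_neg he]
      rw [hstep, ih]
      simp only [pvGroup, hg, if_neg he, mergeM]
      simp

-- B's drop-leading-empty step is mergeM []
lemma stepRev_pvGroup (el : String) (rest : List String) :
    stepRev (pvGroup rest) el = pvGroup (el :: rest) := by
  obtain ⟨g0, gs, hg⟩ := List.exists_cons_of_ne_nil (pvGroup_ne_nil rest)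
  simp only [pvGroup, hg, stepRev]

lemma revFold_eq_pvGroup (args : List String) :
    args.reverse.foldl stepRev [[]] = pvGroup args := by
  induction args with
  | nil => simp [pvGroup]
  | cons el rest ih =>
    rw [List.reverse_cons, List.foldl_append, ih, List.foldl_cons, List.foldl_nil,
      stepRev_pvGroup]

lemma alt_eq_mergeM (args : List String) :
    merge_args_alt args = (mergeM [] (pvGroup args)).map mergeGroup := by
  obtain ⟨g0, gs', hg⟩ := List.exists_cons_of_ne_nil (pvGroup_ne_nil args)
  simp only [merge_args_alt, revFold_eq_pvGroup, hg, mergeM]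
  by_cases h0 : g0 = ([] : List String)
  · cases gs' with
    | nil => simp [h0]
    | cons a b => simp [h0]
  · simp [h0]

-- ===== VERDICT (by name: the statement is the Claim_ definition above) =====
theorem merge_args_spec : Claim_equal_merge_args := by
  intro args _
  unfold Spec_merge_args merge_args
  have h1 := merge_loop args [] [] [] (Or.inl ⟨rfl, rfl⟩)
  have h2 := foldB_eq_mergeM args [] []
  rw [alt_eq_mergeM]
  simpa [h2] using h1
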